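-- pv_equiv track=rewrite | github.com/NeshSab/ai_interview_app_streamlit | app/core/services/answer_critic.py | _extract_last_qa
-- ===== SOURCE A (Python) =====
-- def _extract_last_qa(history: list[dict[str, str]]) -> tuple[str, str]:
--     """
--     Return (previous_assistant_question, last_user_answer) from the history.
--     If not present, returns ("", "").
--     """
--     last_user = ""
--     prev_assistant = ""
--
--     for idx in range(len(history) - 1, -1, -1):
--         m = history[idx]
--         if m.get("role") == "user":
--             last_user = (m.get("content") or "").strip()
--             for j in range(idx - 1, -1, -1):
--                 if history[j].get("role") == "assistant":
--                     prev_assistant = (history[j].get("content") or "").strip()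
--                     break
--             break
--
--     return prev_assistant, last_user
-- ===== SOURCE B (Python) =====
-- def _extract_last_qa(history: list[dict[str, str]]) -> tuple[str, str]:
--     """Single forward pass: keep the latest assistant content seen so far;
--     on every user message record (that assistant content, user content)."""
--     running_assistant = ""
--     result = ("", "")
--     for m in history:
--         role = m.get("role")
--         if role == "assistant":
--             running_assistant = (m.get("content") or "").strip()
--         elif role == "user":
--             result = (running_assistant, (m.get("content") or "").strip())
--     return result
-- ===== Notes on version B (the rewrite author's own statement) =====
-- stated objective: alternative
-- what changed: Replaces A's backward scan with a nested backward inner scan per user message by a single forward fold that maintains the last assistant content and overwrites the result on each user message.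
import Mathlib
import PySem

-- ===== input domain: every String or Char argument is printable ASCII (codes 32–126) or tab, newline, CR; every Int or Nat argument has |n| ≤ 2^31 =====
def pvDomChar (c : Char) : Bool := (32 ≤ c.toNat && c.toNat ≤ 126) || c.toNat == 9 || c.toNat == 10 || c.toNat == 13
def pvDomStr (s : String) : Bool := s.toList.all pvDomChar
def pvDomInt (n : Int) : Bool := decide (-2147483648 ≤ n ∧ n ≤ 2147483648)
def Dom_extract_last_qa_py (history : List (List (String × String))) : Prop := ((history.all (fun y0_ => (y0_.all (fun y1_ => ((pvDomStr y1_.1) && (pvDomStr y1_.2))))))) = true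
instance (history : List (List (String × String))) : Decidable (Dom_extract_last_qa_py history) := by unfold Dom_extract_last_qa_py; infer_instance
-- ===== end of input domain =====

-- B replaces A's backward scan (with a nested backward search for the preceding
-- assistant) by a single forward fold over the history; same return value.

-- ===== PORT A =====
-- dict.get(k): first-match lookup in the association list (dict convention)
def pvGetA (m : List (String × String)) (k : String) : Option String :=
  (m.find? (fun p => p.1 == k)).map (·.2)

-- inner loop: 'for j in range(idx-1, -1, -1): if role == "assistant": … break'
def pvAInner (history : List (List (String × String))) : Nat → String
  | 0 => ""
  | j + 1 =>
    let m := (PySem.List.pyGet? history (j : Int)).getD []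
    if pvGetA m "role" == some "assistant" then
      PySem.Str.strip ((pvGetA m "content").getD "")
    else pvAInner history j

-- outer loop: 'for idx in range(len(history)-1, -1, -1): if role == "user": … break'
def pvAOuter (history : List (List (String × String))) : Nat → String × String
  | 0 => ("", "")
  | i + 1 =>
    let m := (PySem.List.pyGet? history (i : Int)).getD []
    if pvGetA m "role" == some "user" then
      (pvAInner history i, PySem.Str.strip ((pvGetA m "content").getD ""))
    else pvAOuter history i

def extract_last_qa_py (history : List (List (String × String))) : String × String :=
  pvAOuter history history.length

-- ===== PORT B =====
def pvGetB (m : List (String × String)) (k : String) : Option String :=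
  (m.find? (fun p => p.1 == k)).map (·.2)

-- fold state: (running_assistant, result)
def pvBStep (st : String × (String × String)) (m : List (String × String)) :
    String × (String × String) :=
  let role := pvGetB m "role"
  if role == some "assistant" then
    (PySem.Str.strip ((pvGetB m "content").getD ""), st.2)
  else if role == some "user" then
    (st.1, (st.1, PySem.Str.strip ((pvGetB m "content").getD "")))
  else st

def extract_last_qa_py_alt (history : List (List (String × String))) : String × String :=
  (history.foldl pvBStep ("", ("", ""))).2

-- ===== PRECONDITION & SPEC =====
def Spec_extract_last_qa_py (history : List (List (String × String))) (out : String × String) : Prop := out = extract_last_qa_py_alt history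
instance (history : List (List (String × String))) (out : String × String) : Decidable (Spec_extract_last_qa_py history out) := by unfold Spec_extract_last_qa_py; infer_instance

-- ===== CLAIM (what is proved, stated in full; the proofs are below) =====
def Claim_equal_extract_last_qa_py : Prop := ∀ (history : List (List (String × String))), Dom_extract_last_qa_py history → Spec_extract_last_qa_py history (extract_last_qa_py history)

-- ===== LEMMAS AND PROOFS =====

-- A's loops only read indices < k, so appending at the end does not change them
lemma pvAInner_append (history : List (List (String × String)))
    (m : List (String × String)) (k : Nat) (hk : k ≤ history.length) :
    pvAInner (history ++ [m]) k = pvAInner history k := by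
  induction k with
  | zero => rfl
  | succ j ih =>
    have hj : j < history.length := by omega
    simp only [pvAInner, PySem.List.pyGet?_natCast,
      List.getElem?_append_left hj, ih (by omega)]

lemma pvAOuter_append (history : List (List (String × String)))
    (m : List (String × String)) (k : Nat) (hk : k ≤ history.length) :
    pvAOuter (history ++ [m]) k = pvAOuter history k := by
  induction k with
  | zero => rfl
  | succ i ih =>
    have hi : i < history.length := by omega
    simp only [pvAOuter, PySem.List.pyGet?_natCast,
      List.getElem?_append_left hi, ih (by omega),
      pvAInner_append history m i (by omega)]

-- the fold's full state is (A's inner scan from the end, A's outer result)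
lemma pvFold_eq (history : List (List (String × String))) :
    history.foldl pvBStep ("", ("", "")) =
      (pvAInner history history.length, pvAOuter history history.length) := by
  induction history using List.reverseRecOn with
  | nil => rfl
  | append_singleton hist m ih =>
    have hlen : (hist ++ [m]).length = hist.length + 1 := by simp
    rw [List.foldl_append, ih, hlen]
    have hget : PySem.List.pyGet? (hist ++ [m]) (hist.length : Int) = some m := by
      simp
    simp only [pvAInner, pvAOuter, hget, Option.getD_some,
      pvAInner_append hist m hist.length le_rfl,
      pvAOuter_append hist m hist.length le_rfl]
    unfold pvBStep pvGetB pvGetA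
    split_ifs <;> simp_all
    obtain ⟨a, e1⟩ :=
      ‹∃ a, List.find? (fun p => p.1 == "role") m = some (a, "assistant")›
    obtain ⟨b, e2⟩ :=
      ‹∃ a, List.find? (fun p => p.1 == "role") m = some (a, "user")›
    rw [e1] at e2
    simp at e2

-- ===== VERDICT (by name: the statement is the Claim_ definition above) =====
theorem extract_last_qa_py_spec : Claim_equal_extract_last_qa_py := by
  intro history _
  unfold Spec_extract_last_qa_py extract_last_qa_py extract_last_qa_py_alt
  rw [pvFold_eq]
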